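-- pv_equiv track=rewrite | github.com/kjuma7/materials | FinalChoresDistributor.py | is_assignment_envy_free
-- ===== SOURCE A (Python) =====
-- def calculate_difficulty(person, chores_assigned, ratings):
--     return sum(ratings[person][chore["name"]] for chore in chores_assigned)
--
-- def is_assignment_envy_free(assignment, ratings, persons):
--     for person in persons:
--         own_difficulty = calculate_difficulty(person, assignment[person], ratings)
--         for other_person in persons:
--             if person != other_person:
--                 other_difficulty = calculate_difficulty(person, assignment[other_person], ratings)
--                 if own_difficulty > other_difficulty:
--                     return False
--     return True
-- ===== SOURCE B (Python) =====
-- def bundle_tally(chores):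
--     # condense a bundle into a chore-name -> multiplicity tally
--     t = {}
--     for chore in chores:
--         name = chore["name"]
--         t[name] = t.get(name, 0) + 1
--     return t
--
-- def tally_cost(tally, my_ratings):
--     return sum(count * my_ratings[name] for name, count in tally.items())
--
-- def is_assignment_envy_free(assignment, ratings, persons):
--     # Stage 1: compress every bundle into a chore-name tally once.
--     tallies = [bundle_tally(assignment[p]) for p in persons]
--     # Stage 2: nobody may rate some tally strictly cheaper than their own.
--     for person, own_tally in zip(persons, tallies):
--         my_ratings = ratings[person]
--         own = tally_cost(own_tally, my_ratings)
--         if any(tally_cost(t, my_ratings) < own for t in tallies):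
--             return False
--     return True
-- ===== Notes on version B (the rewrite author's own statement) =====
-- stated objective: alternative
-- what changed: B first compresses every bundle into a chore-name->count tally (a staged pass over the assignment, data A never builds), then scores each tally as sum(count*rating) and declares envy-freeness when no person rates any tally strictly below their own; A instead re-walks each raw bundle chore-by-chore inside nested pairwise comparisons with early return.
-- outside the precondition, e.g. on is_assignment_envy_free({'': []}, {}, ['', '']): A returns True, B raises KeyError
import Mathlib
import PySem

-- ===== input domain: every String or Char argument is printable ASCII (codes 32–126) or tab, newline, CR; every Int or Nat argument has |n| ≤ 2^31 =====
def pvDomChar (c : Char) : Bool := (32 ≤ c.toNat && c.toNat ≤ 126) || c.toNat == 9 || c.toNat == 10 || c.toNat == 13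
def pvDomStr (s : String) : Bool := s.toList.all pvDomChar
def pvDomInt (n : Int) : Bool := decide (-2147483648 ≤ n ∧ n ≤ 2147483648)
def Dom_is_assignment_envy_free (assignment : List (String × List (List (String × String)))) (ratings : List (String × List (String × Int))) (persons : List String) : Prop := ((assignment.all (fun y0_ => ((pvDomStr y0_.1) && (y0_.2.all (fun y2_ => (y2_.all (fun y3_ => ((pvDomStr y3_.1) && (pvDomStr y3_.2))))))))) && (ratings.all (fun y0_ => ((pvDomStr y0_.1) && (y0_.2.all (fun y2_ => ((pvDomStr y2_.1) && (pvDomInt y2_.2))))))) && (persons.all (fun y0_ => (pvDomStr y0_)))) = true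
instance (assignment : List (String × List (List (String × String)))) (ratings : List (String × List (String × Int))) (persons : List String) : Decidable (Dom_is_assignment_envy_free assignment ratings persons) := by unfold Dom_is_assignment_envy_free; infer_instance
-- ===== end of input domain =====

-- B compresses every bundle into a chore-name→count tally once, scores tallies as Σ count·rating, and checks that
-- nobody rates any tally strictly below their own — replacing A's pairwise chore-by-chore rescans (objective: alternative).

-- ===== PORT A =====
-- dict lookups: first match in the association list; .getD defaults are never reached inside Pre_ (Python raises KeyError there)
def pvCalcDiff (person : String) (chores : List (List (String × String))) (ratings : List (String × List (String × Int))) : Int :=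
  chores.foldl (fun acc chore =>
    acc + ((List.lookup ((List.lookup "name" chore).getD "") ((List.lookup person ratings).getD [])).getD 0)) 0

-- inner 'for other_person in persons' loop with early 'return False'
def pvInnerA (assignment : List (String × List (List (String × String)))) (ratings : List (String × List (String × Int))) (person : String) (own : Int) : List String → Bool
  | [] => true
  | o :: rest =>
    if person ≠ o then
      let other := pvCalcDiff person ((List.lookup o assignment).getD []) ratings
      if own > other then false
      else pvInnerA assignment ratings person own rest
    else pvInnerA assignment ratings person own rest

-- outer 'for person in persons' loop; a False from the inner loop propagates out
def pvOuterA (assignment : List (String × List (List (String × String)))) (ratings : List (String × List (String × Int))) (allPersons : List String) : List String → Bool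
  | [] => true
  | p :: rest =>
    let own := pvCalcDiff p ((List.lookup p assignment).getD []) ratings
    if pvInnerA assignment ratings p own allPersons then pvOuterA assignment ratings allPersons rest
    else false

def is_assignment_envy_free (assignment : List (String × List (List (String × String)))) (ratings : List (String × List (String × Int))) (persons : List String) : Bool :=
  pvOuterA assignment ratings persons persons

-- ===== PORT B =====
-- bundle_tally: t[name] = t.get(name, 0) + 1 over the bundle's chores
def pvBundleTally (chores : List (List (String × String))) : PySem.Dict String Int :=
  chores.foldl (fun t chore =>
    let name := (List.lookup "name" chore).getD ""
    t.insert name (t.getD name 0 + 1)) PySem.Dict.empty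

-- tally_cost: sum(count * my_ratings[name] for name, count in tally.items())
def pvTallyCost (tally : PySem.Dict String Int) (myRatings : List (String × Int)) : Int :=
  tally.items.foldl (fun acc kv => acc + kv.2 * ((List.lookup kv.1 myRatings).getD 0)) 0

def is_assignment_envy_free_alt (assignment : List (String × List (List (String × String)))) (ratings : List (String × List (String × Int))) (persons : List String) : Bool :=
  let tallies := persons.map (fun p => pvBundleTally ((List.lookup p assignment).getD []))
  (persons.zip tallies).all (fun pt =>
    let myRatings := (List.lookup pt.1 ratings).getD []
    let own := pvTallyCost pt.2 myRatings
    !(tallies.any (fun t => pvTallyCost t myRatings < own)))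

-- ===== PRECONDITION & SPEC =====
-- Pre_ excludes inputs with a missing dict key (person absent from assignment/ratings, chore without "name",
-- or a chore name absent from a rater's ratings): there Python raises KeyError in A or in B, or A returns False
-- only by early exit before reaching the missing key (B's up-front tally pass raises there).
def Pre_is_assignment_envy_free (assignment : List (String × List (List (String × String)))) (ratings : List (String × List (String × Int))) (persons : List String) : Prop :=
  ∀ p ∈ persons, (List.lookup p assignment).isSome ∧ (List.lookup p ratings).isSome ∧
    ∀ q ∈ persons, ∀ chore ∈ (List.lookup q assignment).getD [],
      ((List.lookup "name" chore).bind (fun nm => List.lookup nm ((List.lookup p ratings).getD []))).isSome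
instance (assignment : List (String × List (List (String × String)))) (ratings : List (String × List (String × Int))) (persons : List String) : Decidable (Pre_is_assignment_envy_free assignment ratings persons) := by unfold Pre_is_assignment_envy_free; infer_instance

def pvWitness_is_assignment_envy_free : (List (String × List (List (String × String)))) × (List (String × List (String × Int))) × List String :=
  ([("a", [[("name", "x")]]), ("b", [])], [("a", [("x", 1)]), ("b", [("x", 2)])], ["a", "b"])

def Spec_is_assignment_envy_free (assignment : List (String × List (List (String × String)))) (ratings : List (String × List (String × Int))) (persons : List String) (out : Bool) : Prop := out = is_assignment_envy_free_alt assignment ratings persons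
instance (assignment : List (String × List (List (String × String)))) (ratings : List (String × List (String × Int))) (persons : List String) (out : Bool) : Decidable (Spec_is_assignment_envy_free assignment ratings persons out) := by unfold Spec_is_assignment_envy_free; infer_instance

-- ===== CLAIM (what is proved, stated in full; the proofs are below) =====
def Claim_equal_is_assignment_envy_free : Prop := ∀ (assignment : List (String × List (List (String × String)))) (ratings : List (String × List (String × Int))) (persons : List String), Dom_is_assignment_envy_free assignment ratings persons → Pre_is_assignment_envy_free assignment ratings persons → Spec_is_assignment_envy_free assignment ratings persons (is_assignment_envy_free assignment ratings persons)

-- ===== LEMMAS AND PROOFS =====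

-- the tally of a bundle IS the Counter of its chore names
theorem pvBundleTally_eq_counter (chores : List (List (String × String))) :
    pvBundleTally chores = PySem.Dict.counter (chores.map (fun c => (List.lookup "name" c).getD "")) := by
  unfold pvBundleTally
  rw [← PySem.Dict.foldl_insert_getD_add_one_eq_counter, List.foldl_map]

-- Σ over distinct names of count·rating equals the chore-by-chore sum
theorem pvCountSum (ns : List String) (rr : String → Int) :
    ((PySem.Set.ofList ns).map (fun k => (ns.count k : Int) * rr k)).sum = (ns.map rr).sum := by
  rw [← List.sum_toFinset _ (PySem.Set.nodup_ofList ns)]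
  have hfe : (PySem.Set.ofList ns).toFinset = ns.toFinset := by
    apply Finset.ext; intro x
    simp [List.mem_toFinset, PySem.Set.mem_ofList]
  rw [hfe, Finset.sum_list_map_count]
  apply Finset.sum_congr rfl
  intro x _
  simp

-- scoring a bundle's tally gives exactly A's calculate_difficulty
theorem pvTallyCost_eq_calcDiff (person : String) (chores : List (List (String × String))) (ratings : List (String × List (String × Int))) :
    pvTallyCost (pvBundleTally chores) ((List.lookup person ratings).getD []) = pvCalcDiff person chores ratings := by
  unfold pvTallyCost pvCalcDiff
  rw [pvBundleTally_eq_counter]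
  simp only [PySem.Dict.items_counter, PySem.List.foldl_add, List.map_map, zero_add,
    Function.comp_def]
  rw [pvCountSum _ (fun k => (List.lookup k ((List.lookup person ratings).getD [])).getD 0), List.map_map]
  rfl

theorem pvInnerA_eq_true (assignment : List (String × List (List (String × String)))) (ratings : List (String × List (String × Int))) (person : String) (own : Int) (lst : List String) :
    pvInnerA assignment ratings person own lst = true ↔
      ∀ o ∈ lst, person ≠ o → own ≤ pvCalcDiff person ((List.lookup o assignment).getD []) ratings := by
  induction lst with
  | nil => simp [pvInnerA]
  | cons o rest ih =>
      simp only [pvInnerA]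
      by_cases hpo : person = o
      · rw [if_neg (show ¬person ≠ o by simp [hpo]), ih]
        constructor
        · intro h o' ho' hne
          rcases List.mem_cons.mp ho' with rfl | ho'
          · exact absurd hpo hne
          · exact h o' ho' hne
        · intro h o' ho' hne
          exact h o' (List.mem_cons_of_mem _ ho') hne
      · rw [if_pos hpo]
        by_cases hgt : own > pvCalcDiff person ((List.lookup o assignment).getD []) ratings
        · rw [if_pos hgt]
          constructor
          · intro h; exact absurd h (by simp)
          · intro h; exact absurd (h o List.mem_cons_self hpo) (by omega)
        · rw [if_neg hgt, ih]
          constructor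
          · intro h o' ho' hne
            rcases List.mem_cons.mp ho' with rfl | ho'
            · omega
            · exact h o' ho' hne
          · intro h o' ho' hne
            exact h o' (List.mem_cons_of_mem _ ho') hne

theorem pvOuterA_eq_true (assignment : List (String × List (List (String × String)))) (ratings : List (String × List (String × Int))) (allPersons lst : List String) :
    pvOuterA assignment ratings allPersons lst = true ↔
      ∀ p ∈ lst, pvInnerA assignment ratings p (pvCalcDiff p ((List.lookup p assignment).getD []) ratings) allPersons = true := by
  induction lst with
  | nil => simp [pvOuterA]
  | cons p rest ih =>
      simp only [pvOuterA]
      by_cases hp : pvInnerA assignment ratings p (pvCalcDiff p ((List.lookup p assignment).getD []) ratings) allPersons = true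
      · simp [hp, ih]
      · simp only [if_neg hp]
        constructor
        · intro h; exact absurd h (by simp)
        · intro h; exact absurd (h p List.mem_cons_self) hp

theorem pv_ports_eq (assignment : List (String × List (List (String × String)))) (ratings : List (String × List (String × Int))) (persons : List String) :
    is_assignment_envy_free assignment ratings persons = is_assignment_envy_free_alt assignment ratings persons := by
  have hzip : persons.zip (persons.map (fun p => pvBundleTally ((List.lookup p assignment).getD []))) =
      persons.map (fun p => (p, pvBundleTally ((List.lookup p assignment).getD []))) := by
    simpa using (List.zip_map' (f := id)
      (g := fun p => pvBundleTally ((List.lookup p assignment).getD [])) (l := persons))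
  have key : (is_assignment_envy_free assignment ratings persons = true) ↔
      (is_assignment_envy_free_alt assignment ratings persons = true) := by
    unfold is_assignment_envy_free is_assignment_envy_free_alt
    rw [pvOuterA_eq_true]
    simp only [hzip, List.all_eq_true, List.mem_map, forall_exists_index, and_imp]
    constructor
    · intro h pt p hp hpt
      subst hpt
      have hinner := (pvInnerA_eq_true assignment ratings p _ persons).mp (h p hp)
      simp only [Bool.not_eq_eq_eq_not, Bool.not_true, List.any_eq_false, List.mem_map]
      rintro t ⟨o, ho, rfl⟩
      rw [pvTallyCost_eq_calcDiff, pvTallyCost_eq_calcDiff]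
      simp only [decide_eq_true_eq, not_lt]
      by_cases hpo : p = o
      · subst hpo; exact le_refl _
      · exact hinner o ho hpo
    · intro h p hp
      rw [pvInnerA_eq_true]
      intro o ho _
      have := h (p, pvBundleTally ((List.lookup p assignment).getD [])) p hp rfl
      simp only [Bool.not_eq_eq_eq_not, Bool.not_true, List.any_eq_false, List.mem_map] at this
      have ht := this (pvBundleTally ((List.lookup o assignment).getD [])) ⟨o, ho, rfl⟩
      rw [pvTallyCost_eq_calcDiff, pvTallyCost_eq_calcDiff] at ht
      simp only [decide_eq_true_eq, not_lt] at ht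
      exact ht
  cases hA : is_assignment_envy_free assignment ratings persons <;>
    cases hB : is_assignment_envy_free_alt assignment ratings persons <;> simp_all

-- ===== VERDICT (by name: the statement is the Claim_ definition above) =====
theorem is_assignment_envy_free_spec : Claim_equal_is_assignment_envy_free := by
  intro assignment ratings persons _ _
  unfold Spec_is_assignment_envy_free
  exact pv_ports_eq assignment ratings persons
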